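-- pv_equiv track=rewrite | github.com/kyotoai/SEIMEI | exp11_plasma_gkv_v3/train_v3_eval_sample.py | truncate_messages_before_step
-- ===== SOURCE A (Python) =====
-- from typing import Any, Dict, Iterable, List, Optional, Sequence, Set, Tuple
--
-- def truncate_messages_before_step(messages: Sequence[Dict[str, Any]], step: int) -> List[Dict[str, Any]]:
--     if step <= 1:
--         truncated: List[Dict[str, Any]] = []
--         agent_seen = 0
--         for msg in messages:
--             if msg.get("role") == "agent":
--                 agent_seen += 1
--                 if agent_seen >= 1:
--                     break
--             truncated.append(dict(msg))
--         return truncated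
--
--     truncated = []
--     agent_seen = 0
--     for msg in messages:
--         if msg.get("role") == "agent":
--             agent_seen += 1
--             if agent_seen >= step:
--                 break
--         truncated.append(dict(msg))
--     return truncated
-- ===== SOURCE B (Python) =====
-- def truncate_messages_before_step(messages, step):
--     n = max(step, 1)
--     agent_idx = [i for i, m in enumerate(messages) if m.get("role") == "agent"]
--     cut = agent_idx[n - 1] if len(agent_idx) >= n else len(messages)
--     return [dict(m) for m in messages[:cut]]
-- ===== Notes on version B (the rewrite author's own statement) =====
-- stated objective: simpler
-- what changed: Replaces the two duplicated counting-and-breaking loops with a single pass that builds an index table of agent-message positions, picks the cut position (the max(step,1)-th agent index, or the end), and returns a copied slice.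
import Mathlib
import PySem

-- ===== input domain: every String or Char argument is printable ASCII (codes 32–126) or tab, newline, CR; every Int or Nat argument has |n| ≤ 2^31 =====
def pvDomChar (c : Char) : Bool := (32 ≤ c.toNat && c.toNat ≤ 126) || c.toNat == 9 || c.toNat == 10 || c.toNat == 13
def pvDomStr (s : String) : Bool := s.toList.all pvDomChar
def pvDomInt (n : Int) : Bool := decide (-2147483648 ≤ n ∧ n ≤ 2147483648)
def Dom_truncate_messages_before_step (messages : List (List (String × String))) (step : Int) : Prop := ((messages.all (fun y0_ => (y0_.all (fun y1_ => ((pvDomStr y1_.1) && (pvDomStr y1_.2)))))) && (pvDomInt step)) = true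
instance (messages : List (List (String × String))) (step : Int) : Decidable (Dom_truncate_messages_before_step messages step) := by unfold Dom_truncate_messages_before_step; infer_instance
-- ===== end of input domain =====

-- B replaces A's two duplicated counting-and-breaking loops by an agent-index table plus a slice
-- (objective: simpler). Both return fresh shallow copies; on this List model dict(m) is m itself.

-- ===== PORT A =====
-- msg.get("role"): first-match lookup on the association list (Python dicts have unique keys).
def pvGet? : List (String × String) → String → Option String
  | [], _ => none
  | (k, v) :: rest, key => if k == key then some v else pvGet? rest key

def pvIsAgent (m : List (String × String)) : Bool := pvGet? m "role" == some "agent"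

-- the loop A writes twice: thr is the break threshold (1 in the first branch, step in the second),
-- seen the agent counter; break before appending returns the accumulated prefix
def pvLoopA (thr : Int) (seen : Int) : List (List (String × String)) → List (List (String × String))
  | [] => []
  | m :: ms =>
    if pvIsAgent m then
      if seen + 1 ≥ thr then []
      else m :: pvLoopA thr (seen + 1) ms
    else m :: pvLoopA thr seen ms

def truncate_messages_before_step (messages : List (List (String × String))) (step : Int) : List (List (String × String)) :=
  if step ≤ 1 then pvLoopA 1 0 messages else pvLoopA step 0 messages

-- ===== PORT B =====
-- agent_idx = [i for i, m in enumerate(messages) if m.get("role") == "agent"]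
def pvAgentIdx (messages : List (List (String × String))) : List Int :=
  ((PySem.List.enumerate messages 0).filter (fun p => pvIsAgent p.2)).map (fun p => p.1)

def truncate_messages_before_step_alt (messages : List (List (String × String))) (step : Int) : List (List (String × String)) :=
  let n : Int := max step 1
  let agentIdx := pvAgentIdx messages
  -- agent_idx[n-1] is only evaluated under the guard len(agent_idx) >= n, so the index is in range
  let cut : Int := if (agentIdx.length : Int) ≥ n then PySem.List.pyGetD agentIdx (n - 1) 0 else (messages.length : Int)
  PySem.List.slice messages none (some cut)

-- ===== PRECONDITION & SPEC =====
def Spec_truncate_messages_before_step (messages : List (List (String × String))) (step : Int) (out : List (List (String × String))) : Prop := out = truncate_messages_before_step_alt messages step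
instance (messages : List (List (String × String))) (step : Int) (out : List (List (String × String))) : Decidable (Spec_truncate_messages_before_step messages step out) := by unfold Spec_truncate_messages_before_step; infer_instance

-- ===== CLAIM (what is proved, stated in full; the proofs are below) =====
def Claim_equal_truncate_messages_before_step : Prop := ∀ (messages : List (List (String × String))) (step : Int), Dom_truncate_messages_before_step messages step → Spec_truncate_messages_before_step messages step (truncate_messages_before_step messages step)

-- ===== LEMMAS AND PROOFS =====

-- Nat-level positions of the agent messages (proof-side characterisation of pvAgentIdx)
def pvAIdx : List (List (String × String)) → List Nat
  | [] => []
  | m :: ms => if pvIsAgent m then 0 :: (pvAIdx ms).map (· + 1) else (pvAIdx ms).map (· + 1)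

theorem pvAgentIdx_eq (ms : List (List (String × String))) (s : Int) :
    ((PySem.List.enumerate ms s).filter (fun p => pvIsAgent p.2)).map (fun p => p.1)
      = (pvAIdx ms).map (fun (i : Nat) => s + (i : Int)) := by
  induction ms generalizing s with
  | nil => simp [pvAIdx, PySem.List.enumerate_nil]
  | cons m ms ih =>
    rw [PySem.List.enumerate_cons]
    by_cases h : pvIsAgent m = true
    · rw [List.filter_cons_of_pos (by simpa using h), List.map_cons, ih (s + 1)]
      simp only [pvAIdx, h, if_true, List.map_cons, List.map_map]
      congr 1
      · simp
      · apply List.map_congr_left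
        intro i _
        simp only [Function.comp_apply]
        push_cast
        ring
    · rw [List.filter_cons_of_neg (by simpa using h), ih (s + 1)]
      simp only [pvAIdx, h, Bool.false_eq_true, if_false, List.map_map]
      apply List.map_congr_left
      intro i _
      simp only [Function.comp_apply]
      push_cast
      ring

theorem pvLoopA_shift (ms : List (List (String × String))) :
    ∀ thr seen : Int, pvLoopA thr seen ms = pvLoopA (thr - seen) 0 ms := by
  induction ms with
  | nil => intros; rfl
  | cons m ms ih =>
    intro thr seen
    simp only [pvLoopA]
    by_cases h : pvIsAgent m = true
    · simp only [h, if_true]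
      by_cases hb : seen + 1 ≥ thr
      · rw [if_pos hb, if_pos (by omega : (0 : Int) + 1 ≥ thr - seen)]
      · rw [if_neg hb, if_neg (by omega : ¬((0 : Int) + 1 ≥ thr - seen)),
            ih thr (seen + 1), ih (thr - seen) (0 + 1)]
        have : thr - (seen + 1) = thr - seen - (0 + 1) := by ring
        rw [this]
    · simp only [h, Bool.false_eq_true, if_false]
      rw [ih thr seen]

-- the cut position B computes, at the Nat level
def pvCutN (k : Nat) (ms : List (List (String × String))) : Nat :=
  if k ≤ (pvAIdx ms).length then (pvAIdx ms).getD (k - 1) ms.length else ms.length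

theorem pvLoopA_eq_take (ms : List (List (String × String))) :
    ∀ k : Nat, 1 ≤ k → pvLoopA (k : Int) 0 ms = ms.take (pvCutN k ms) := by
  induction ms with
  | nil => intro k hk; simp [pvLoopA]
  | cons m ms ih =>
    intro k hk
    simp only [pvLoopA, pvCutN, pvAIdx]
    by_cases h : pvIsAgent m = true
    · simp only [h, if_true, List.length_cons, List.length_map]
      by_cases h1 : k = 1
      · subst h1
        rw [if_pos (by norm_num)]
        rw [if_pos (by simp)]
        simp
      · have hk2 : 2 ≤ k := by omega
        rw [if_neg (by push_cast; omega)]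
        rw [pvLoopA_shift, show (k : Int) - (0 + 1) = ((k - 1 : Nat) : Int) by omega,
            ih (k - 1) (by omega)]
        simp only [pvCutN]
        by_cases hc : k - 1 ≤ (pvAIdx ms).length
        · rw [if_pos hc, if_pos (show k ≤ (pvAIdx ms).length + 1 by omega)]
          have hlt : k - 2 < (pvAIdx ms).length := by omega
          have heq : (0 :: (pvAIdx ms).map (· + 1)).getD (k - 1) (ms.length + 1)
              = (pvAIdx ms).getD (k - 2) ms.length + 1 := by
            rcases Nat.exists_eq_add_of_le hk2 with ⟨j, rfl⟩
            rw [show 2 + j - 1 = j + 1 by omega, List.getD_cons_succ]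
            rw [List.getD_eq_getElem _ _ (by simpa using hlt),
                List.getD_eq_getElem _ _ (by simpa using hlt)]
            simp [show 2 + j - 2 = j by omega]
          rw [heq, List.take_succ_cons, show k - 1 - 1 = k - 2 by omega]
        · rw [if_neg hc, if_neg (show ¬ k ≤ (pvAIdx ms).length + 1 by omega)]
          simp
    · simp only [h, Bool.false_eq_true, if_false, List.length_cons, List.length_map]
      rw [ih k hk]
      simp only [pvCutN]
      by_cases hc : k ≤ (pvAIdx ms).length
      · rw [if_pos hc, if_pos hc]
        have hlt : k - 1 < (pvAIdx ms).length := by omega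
        have heq : ((pvAIdx ms).map (· + 1)).getD (k - 1) (ms.length + 1)
            = (pvAIdx ms).getD (k - 1) ms.length + 1 := by
          rw [List.getD_eq_getElem _ _ (by simpa using hlt),
              List.getD_eq_getElem _ _ hlt]
          simp
        rw [heq, List.take_succ_cons]
      · rw [if_neg hc, if_neg hc]
        simp

theorem alt_eq_take (messages : List (List (String × String))) (step : Int) :
    truncate_messages_before_step_alt messages step
      = messages.take (pvCutN (max step 1).toNat messages) := by
  have hn1 : (1 : Int) ≤ max step 1 := le_max_right _ _
  have hkn : (((max step 1).toNat : Nat) : Int) = max step 1 := Int.toNat_of_nonneg (by omega)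
  simp only [truncate_messages_before_step_alt, pvAgentIdx]
  rw [pvAgentIdx_eq messages 0]
  simp only [List.length_map]
  by_cases hc : (max step 1).toNat ≤ (pvAIdx messages).length
  · rw [if_pos (show ((pvAIdx messages).length : Int) ≥ max step 1 by omega)]
    have hlt : (max step 1).toNat - 1 < (pvAIdx messages).length := by omega
    have hidx : PySem.List.pyGetD ((pvAIdx messages).map (fun (i : Nat) => (0 : Int) + (i : Int))) (max step 1 - 1) 0
        = (((pvAIdx messages).getD ((max step 1).toNat - 1) messages.length : Nat) : Int) := by
      rw [show max step 1 - 1 = (((max step 1).toNat - 1 : Nat) : Int) by omega]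
      rw [PySem.List.pyGetD_natCast]
      rw [List.getD_eq_getElem _ _ (by simpa using hlt), List.getD_eq_getElem _ _ hlt]
      simp
    rw [hidx, PySem.List.slice_to_natCast]
    unfold pvCutN
    rw [if_pos hc]
  · rw [if_neg (show ¬ ((pvAIdx messages).length : Int) ≥ max step 1 by omega)]
    rw [PySem.List.slice_to_natCast]
    unfold pvCutN
    rw [if_neg hc]

-- ===== VERDICT (by name: the statement is the Claim_ definition above) =====
theorem truncate_messages_before_step_spec : Claim_equal_truncate_messages_before_step := by
  intro messages step _
  unfold Spec_truncate_messages_before_step truncate_messages_before_step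
  rw [alt_eq_take]
  by_cases hs : step ≤ 1
  · rw [if_pos hs, show (max step 1) = 1 by omega]
    have := pvLoopA_eq_take messages 1 (by norm_num)
    simpa using this
  · rw [if_neg hs, show (max step 1) = step by omega]
    have h1 : 1 ≤ step.toNat := by omega
    have := pvLoopA_eq_take messages step.toNat h1
    rwa [Int.toNat_of_nonneg (by omega)] at this
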